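-- pv_equiv track=rewrite | github.com/wlwl1011/coding-test | programmers/bruteForce/6.py | dfs
-- ===== SOURCE A (Python) =====
-- def dfs( wires, ch, element):
--     cnt = 1
--     for i, ele in enumerate(wires):
--         if ch[i] == 0 and element in ele:
--             ch[i] = 1
--             if ele[0] == element:
--                 cnt += dfs(wires, ch, ele[1])
--             else:
--                 cnt += dfs(wires, ch, ele[0])
--             ch[i] = 0
--     return cnt
-- ===== SOURCE B (Python) =====
-- def dfs(wires, ch, element):
--     # Level-by-level BFS over (remaining-edge-indices, vertex) states; counts states per level.
--     avail0 = tuple(i for i in range(len(wires)) if ch[i] == 0)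
--     total = 0
--     frontier = [(avail0, element)]
--     while frontier:
--         total += len(frontier)
--         nxt = []
--         for avail, v in frontier:
--             for i in avail:
--                 a, b = wires[i]
--                 if a == v or b == v:
--                     nxt.append((tuple(j for j in avail if j != i), b if a == v else a))
--         frontier = nxt
--     return total
-- ===== Notes on version B (the rewrite author's own statement) =====
-- stated objective: alternative
-- what changed: replaces A's recursive backtracking with a mutable mark array (mark edge, recurse, unmark) by an iterative level-by-level BFS over (remaining-edge-index-set, vertex) states that counts states per level, with no recursion and no mutation of ch
import Mathlib
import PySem

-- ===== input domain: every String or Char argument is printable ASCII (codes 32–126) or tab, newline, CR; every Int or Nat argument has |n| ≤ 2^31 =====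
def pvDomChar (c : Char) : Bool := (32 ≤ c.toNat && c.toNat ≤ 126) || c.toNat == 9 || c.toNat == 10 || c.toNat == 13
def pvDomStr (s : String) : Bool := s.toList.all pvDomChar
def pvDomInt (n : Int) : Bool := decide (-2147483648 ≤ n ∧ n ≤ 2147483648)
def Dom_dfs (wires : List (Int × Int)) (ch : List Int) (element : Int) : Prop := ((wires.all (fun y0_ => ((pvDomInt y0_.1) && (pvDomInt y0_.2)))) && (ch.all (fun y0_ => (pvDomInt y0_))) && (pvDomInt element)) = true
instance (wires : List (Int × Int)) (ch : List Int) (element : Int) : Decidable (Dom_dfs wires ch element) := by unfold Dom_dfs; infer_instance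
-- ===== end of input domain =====

-- B replaces A's recursive mark/recurse/unmark backtracking by an iterative level-by-level
-- BFS over (remaining-edge-indices, vertex) states, counting states per level (alternative
-- decomposition, same cost). Return-value equivalence: Python A mutates ch transiently but
-- always restores it before returning; B never mutates ch.

-- the indices i < len(wires) with ch[i] == 0, in increasing order; this is B's avail0, and
-- its length serves as the termination measure of port A (A never computes it)
def pvAvail (wires : List (Int × Int)) (ch : List Int) : List Nat :=
  (List.range wires.length).filter (fun i => ch[i]? == some (0 : Int))

-- termination measure for port A: number of unmarked wire slots
def pvZeros (wires : List (Int × Int)) (ch : List Int) : Nat :=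
  (pvAvail wires ch).length

-- cited by the ports' decreasing_by: marking a zero slot strictly shrinks the measure
theorem pvZeros_set_lt (wires : List (Int × Int)) (ch : List Int) (i : Nat)
    (hi : i < wires.length) (h0 : ch[i]? = some (0 : Int)) :
    pvZeros wires (ch.set i 1) < pvZeros wires ch := by
  have hil : i < ch.length := (List.getElem?_eq_some_iff.mp h0).1
  unfold pvZeros pvAvail
  have key : ∀ j ∈ List.range wires.length,
      ((ch.set i 1)[j]? == some (0 : Int)) = (!(j == i) && (ch[j]? == some (0 : Int))) := by
    intro j _
    by_cases hji : j = i
    · subst hji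
      simp [hil]
    · rw [List.getElem?_set_ne (by omega)]
      simp [hji]
  rw [List.filter_congr key, ← List.filter_filter]
  apply List.length_filter_lt_length_iff_exists.mpr
  refine ⟨i, List.mem_filter.mpr ⟨List.mem_range.mpr hi, by simp [h0]⟩, by simp⟩

-- ===== PORT A =====
-- literal transliteration of A: cnt = 1; for i, ele in enumerate(wires): if ch[i] == 0 and
-- element in ele: ch[i] = 1; recurse on the other endpoint; ch[i] = 0.  The list `ch` with
-- slot i set to 1 is passed to the recursive call (Python's transient mutation); the loop
-- itself continues with the restored (original) ch.
mutual
def dfs (wires : List (Int × Int)) (ch : List Int) (element : Int) : Int :=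
  1 + dfsLoop wires ch element 0
termination_by (pvZeros wires ch, wires.length + 1)
decreasing_by exact Prod.Lex.right _ (by omega)

def dfsLoop (wires : List (Int × Int)) (ch : List Int) (element : Int) (i : Nat) : Int :=
  if h : i < wires.length then
    let ele := wires[i]
    if hc : ch[i]? = some (0 : Int) ∧ (ele.1 = element ∨ ele.2 = element) then
      (if ele.1 = element then dfs wires (ch.set i 1) ele.2
       else dfs wires (ch.set i 1) ele.1)
        + dfsLoop wires ch element (i + 1)
    else
      dfsLoop wires ch element (i + 1)
  else 0
termination_by (pvZeros wires ch, wires.length - i)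
decreasing_by
  · exact Prod.Lex.left _ _ (pvZeros_set_lt wires ch i h hc.1)
  · exact Prod.Lex.left _ _ (pvZeros_set_lt wires ch i h hc.1)
  · exact Prod.Lex.right _ (by omega)
  · exact Prod.Lex.right _ (by omega)
end

-- ===== PORT B =====
-- one BFS level: all successor states of the frontier
def pvStep (wires : List (Int × Int)) (frontier : List (List Nat × Int)) :
    List (List Nat × Int) :=
  frontier.flatMap (fun p =>
    p.1.filterMap (fun i =>
      match wires[i]? with
      | some e =>
          if e.1 = p.2 then some (p.1.filter (fun j => j ≠ i), e.2)
          else if e.2 = p.2 then some (p.1.filter (fun j => j ≠ i), e.1)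
          else none
      | none => none))

-- the while loop of Source B; fuel only makes it total (each level shrinks the index sets,
-- so pvAvail.length + 1 levels always suffice — proved below)
def pvLevels (wires : List (Int × Int)) :
    Nat → List (List Nat × Int) → Int → Int
  | 0, _, total => total
  | fuel + 1, frontier, total =>
    if frontier.isEmpty then total
    else pvLevels wires fuel (pvStep wires frontier) (total + frontier.length)

def dfs_alt (wires : List (Int × Int)) (ch : List Int) (element : Int) : Int :=
  pvLevels wires ((pvAvail wires ch).length + 1) [(pvAvail wires ch, element)] 0

-- ===== PRECONDITION & SPEC =====
-- Pre_ excludes exactly the inputs where Python A raises IndexError: ch shorter than wires.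
def Pre_dfs (wires : List (Int × Int)) (ch : List Int) (element : Int) : Prop :=
  wires.length ≤ ch.length
instance (wires : List (Int × Int)) (ch : List Int) (element : Int) : Decidable (Pre_dfs wires ch element) := by unfold Pre_dfs; infer_instance

def pvWitness_dfs : (List (Int × Int)) × List Int × Int := ([(1, 2), (2, 3)], [0, 0], 1)

def Spec_dfs (wires : List (Int × Int)) (ch : List Int) (element : Int) (out : Int) : Prop := out = dfs_alt wires ch element
instance (wires : List (Int × Int)) (ch : List Int) (element : Int) (out : Int) : Decidable (Spec_dfs wires ch element out) := by unfold Spec_dfs; infer_instance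

-- ===== CLAIM (what is proved, stated in full; the proofs are below) =====
def Claim_equal_dfs : Prop := ∀ (wires : List (Int × Int)) (ch : List Int) (element : Int), Dom_dfs wires ch element → Pre_dfs wires ch element → Spec_dfs wires ch element (dfs wires ch element)

-- ===== LEMMAS AND PROOFS =====

-- sum over an attached list = sum over the list (the body ignores the membership proof)
theorem pv_sum_map_attach {a : Type} (l : List a) (F : a -> Int) :
    (l.attach.map (fun i => F i.1)).sum = (l.map F).sum := by
  rw [show (fun (i : {x // x ∈ l}) => F i.1) = F ∘ Subtype.val from rfl, ← List.map_map,
    List.attach_map_subtype_val]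

-- the common specification: number of edge-distinct trails starting at v using indices in avail
def pvT (wires : List (Int × Int)) (avail : List Nat) (v : Int) : Int :=
  1 + (avail.attach.map (fun i =>
        match wires[i.1]? with
        | some e =>
            if e.1 = v then pvT wires (avail.filter (fun j => j ≠ i.1)) e.2
            else if e.2 = v then pvT wires (avail.filter (fun j => j ≠ i.1)) e.1
            else 0
        | none => 0)).sum
termination_by avail.length
decreasing_by
  all_goals
  · simp only [List.length_unattach]
    rw [← List.length_attach (l := avail)]
    apply List.length_filter_lt_length_iff_exists.mpr
    exact ⟨i, List.mem_attach _ _, by simp⟩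

theorem pvT_eq (wires : List (Int × Int)) (avail : List Nat) (v : Int) :
    pvT wires avail v =
      1 + (avail.map (fun i =>
        match wires[i]? with
        | some e =>
            if e.1 = v then pvT wires (avail.filter (fun j => j ≠ i)) e.2
            else if e.2 = v then pvT wires (avail.filter (fun j => j ≠ i)) e.1
            else 0
        | none => 0)).sum := by
  rw [pvT]
  exact congrArg (fun s => 1 + s) (pv_sum_map_attach avail (fun x =>
    match wires[x]? with
    | some e =>
        if e.1 = v then pvT wires (avail.filter (fun j => j ≠ x)) e.2
        else if e.2 = v then pvT wires (avail.filter (fun j => j ≠ x)) e.1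
        else 0
    | none => 0))

-- sum over a filterMap = sum over the source with none ↦ 0
theorem pv_sum_filterMap {α β : Type} (g : α → Option β) (h : β → Int) (l : List α) :
    ((l.filterMap g).map h).sum
      = (l.map (fun a => match g a with | some b => h b | none => 0)).sum := by
  induction l with
  | nil => simp
  | cons a t ih => cases hg : g a <;> simp [hg, ih]

-- one BFS level preserves the total trail count
theorem pvStep_sum (wires : List (Int × Int)) (frontier : List (List Nat × Int)) :
    (frontier.map (fun p => pvT wires p.1 p.2)).sum
      = (frontier.length : Int) + ((pvStep wires frontier).map (fun p => pvT wires p.1 p.2)).sum := by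
  induction frontier with
  | nil => simp [pvStep]
  | cons p t ih =>
    obtain ⟨av, v⟩ := p
    have hchild : ((av.filterMap (fun i =>
        match wires[i]? with
        | some e =>
            if e.1 = v then some (av.filter (fun j => j ≠ i), e.2)
            else if e.2 = v then some (av.filter (fun j => j ≠ i), e.1)
            else none
        | none => none)).map (fun q => pvT wires q.1 q.2)).sum
        = (av.map (fun i =>
            match wires[i]? with
            | some e =>
                if e.1 = v then pvT wires (av.filter (fun j => j ≠ i)) e.2
                else if e.2 = v then pvT wires (av.filter (fun j => j ≠ i)) e.1
                else 0
            | none => 0)).sum := by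
      rw [pv_sum_filterMap]
      apply congrArg List.sum
      apply List.map_congr_left
      intro i _
      cases hw : wires[i]? with
      | none => rfl
      | some e =>
        by_cases h1 : e.1 = v
        · simp [h1]
        · by_cases h2 : e.2 = v <;> simp [h1, h2]
    simp only [pvStep, List.flatMap_cons, List.map_cons, List.map_append, List.sum_cons,
      List.sum_append, List.length_cons]
    rw [pvT_eq wires av v, hchild]
    simp only [pvStep] at ih
    push_cast
    rw [ih]
    ring

theorem pvLevels_eq (wires : List (Int × Int)) :
    ∀ (fuel : Nat) (frontier : List (List Nat × Int)) (total : Int),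
      (∀ p ∈ frontier, p.1.length < fuel) →
      pvLevels wires fuel frontier total = total + (frontier.map (fun p => pvT wires p.1 p.2)).sum := by
  intro fuel
  induction fuel with
  | zero =>
    intro frontier total h
    cases frontier with
    | nil => simp [pvLevels]
    | cons p t => exact absurd (h p (List.mem_cons_self ..)) (by omega)
  | succ fuel ih =>
    intro frontier total h
    by_cases he : frontier.isEmpty
    · rw [List.isEmpty_iff.mp he]
      simp [pvLevels]
    · rw [pvLevels, if_neg he]
      rw [ih _ _ ?_]
      · rw [pvStep_sum wires frontier]
        ring
      · intro q hq
        obtain ⟨p, hp, hq'⟩ := List.mem_flatMap.mp hq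
        obtain ⟨i, hi, hgi⟩ := List.mem_filterMap.mp hq'
        have hflt : (p.1.filter (fun j => j ≠ i)).length < p.1.length :=
          List.length_filter_lt_length_iff_exists.mpr ⟨i, hi, by simp⟩
        have hq1 : q.1 = p.1.filter (fun j => j ≠ i) := by
          cases hw : wires[i]? with
          | none => rw [hw] at hgi; cases hgi
          | some e =>
            rw [hw] at hgi
            dsimp only at hgi
            split_ifs at hgi
            · injection hgi with h2; rw [← h2]
            · injection hgi with h2; rw [← h2]
        have := h p hp
        rw [hq1]
        omega

theorem dfs_alt_eq_pvT (wires : List (Int × Int)) (ch : List Int) (element : Int) :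
    dfs_alt wires ch element = pvT wires (pvAvail wires ch) element := by
  rw [dfs_alt, pvLevels_eq wires _ _ _ (by intro p hp; rw [List.mem_singleton.mp hp]; dsimp only; omega)]
  simp

theorem pvAvail_set (wires : List (Int × Int)) (ch : List Int) (i : Nat) :
    pvAvail wires (ch.set i 1) = (pvAvail wires ch).filter (fun j => j ≠ i) := by
  unfold pvAvail
  rw [List.filter_filter]
  apply List.filter_congr
  intro j _
  by_cases hji : j = i
  · subst hji
    by_cases hl : j < ch.length
    · simp [hl]
    · have h1 : (ch.set j 1)[j]? = none := by
        rw [List.getElem?_eq_none_iff]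
        simpa using (by omega : ch.length ≤ j)
      have h2 : ch[j]? = none := List.getElem?_eq_none_iff.mpr (by omega)
      simp [h1, h2]
  · rw [List.getElem?_set_ne (by omega)]
    simp [hji]

theorem pv_filter_ge_cons {l : List Nat} (hs : l.Pairwise (· < ·)) {i : Nat} (hi : i ∈ l) :
    l.filter (fun j => i ≤ j) = i :: l.filter (fun j => i + 1 ≤ j) := by
  induction l with
  | nil => cases hi
  | cons a t iht =>
    rw [List.pairwise_cons] at hs
    rcases List.mem_cons.mp hi with rfl | hit
    · have htail : t.filter (fun j => i ≤ j) = t.filter (fun j => i + 1 ≤ j) := by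
        apply List.filter_congr
        intro b hb
        have := hs.1 b hb
        simp only [decide_eq_decide]
        omega
      simp only [List.filter_cons]
      rw [if_pos (by simp), if_neg (by simp), htail]
    · have hai : a < i := hs.1 i hit
      simp only [List.filter_cons]
      rw [if_neg (by simp; omega), if_neg (by simp; omega)]
      exact iht hs.2 hit

theorem pv_filter_ge_of_not_mem {l : List Nat} {i : Nat} (hi : i ∉ l) :
    l.filter (fun j => i ≤ j) = l.filter (fun j => i + 1 ≤ j) := by
  apply List.filter_congr
  intro j hj
  have : j ≠ i := fun h => hi (h ▸ hj)
  simp only [decide_eq_decide]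
  omega

theorem dfs_eq_pvT (wires : List (Int × Int)) :
    ∀ (n : Nat) (ch : List Int), pvZeros wires ch = n →
      ∀ element, dfs wires ch element = pvT wires (pvAvail wires ch) element := by
  intro n
  induction n using Nat.strong_induction_on with
  | _ n IH =>
    intro ch hn element
    have hrec : ∀ (ch' : List Int) (w : Int), pvZeros wires ch' < pvZeros wires ch →
        dfs wires ch' w = pvT wires (pvAvail wires ch') w := by
      intro ch' w hlt
      exact IH (pvZeros wires ch') (by omega) ch' rfl w
    have hsorted : (pvAvail wires ch).Pairwise (· < ·) :=
      List.Pairwise.filter _ (List.pairwise_lt_range)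
    have hmemlt : ∀ j ∈ pvAvail wires ch, j < wires.length := by
      intro j hj
      exact List.mem_range.mp (List.mem_filter.mp hj).1
    have hbase : ∀ i : Nat, wires.length ≤ i →
        (pvAvail wires ch).filter (fun j => i ≤ j) = [] := by
      intro i hi
      apply List.filter_eq_nil_iff.mpr
      intro j hj
      have := hmemlt j hj
      simp only [decide_eq_true_eq]
      omega
    have hloop : ∀ (k i : Nat), wires.length - i ≤ k →
        dfsLoop wires ch element i =
          (((pvAvail wires ch).filter (fun j => i ≤ j)).map (fun j =>
            match wires[j]? with
            | some e =>
                if e.1 = element then pvT wires ((pvAvail wires ch).filter (fun m => m ≠ j)) e.2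
                else if e.2 = element then pvT wires ((pvAvail wires ch).filter (fun m => m ≠ j)) e.1
                else 0
            | none => 0)).sum := by
      intro k
      induction k with
      | zero =>
        intro i hik
        rw [dfsLoop, dif_neg (by omega), hbase i (by omega)]
        simp
      | succ k ihk =>
        intro i hik
        by_cases hlen : i < wires.length
        · rw [dfsLoop, dif_pos hlen]
          dsimp only
          by_cases h0 : ch[i]? = some (0 : Int)
          · have hmem : i ∈ pvAvail wires ch :=
              List.mem_filter.mpr ⟨List.mem_range.mpr hlen, by simp [h0]⟩
            rw [pv_filter_ge_cons hsorted hmem, List.map_cons, List.sum_cons,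
              List.getElem?_eq_getElem hlen]
            by_cases h1 : wires[i].1 = element
            · rw [dif_pos ⟨h0, Or.inl h1⟩, if_pos h1,
                hrec _ _ (pvZeros_set_lt wires ch i hlen h0), pvAvail_set,
                ihk (i + 1) (by omega)]
              dsimp only
              rw [if_pos h1]
            · by_cases h2 : wires[i].2 = element
              · rw [dif_pos ⟨h0, Or.inr h2⟩, if_neg h1,
                  hrec _ _ (pvZeros_set_lt wires ch i hlen h0), pvAvail_set,
                  ihk (i + 1) (by omega)]
                dsimp only
                rw [if_neg h1, if_pos h2]
              · rw [dif_neg (by tauto), ihk (i + 1) (by omega)]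
                dsimp only
                rw [if_neg h1, if_neg h2, zero_add]
          · have hnmem : i ∉ pvAvail wires ch := by
              intro hmem
              have := (List.mem_filter.mp hmem).2
              simp at this
              exact h0 this
            rw [dif_neg (fun hc => h0 hc.1), ihk (i + 1) (by omega),
              pv_filter_ge_of_not_mem hnmem]
        · rw [dfsLoop, dif_neg hlen, hbase i (by omega)]
          simp
    rw [dfs, hloop wires.length 0 (by omega), pvT_eq]
    have h0f : (pvAvail wires ch).filter (fun j => 0 ≤ j) = pvAvail wires ch :=
      List.filter_eq_self.mpr (fun j _ => by simp)
    rw [h0f]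

-- ===== VERDICT (by name: the statement is the Claim_ definition above) =====
theorem dfs_spec : Claim_equal_dfs := by
  intro wires ch element _ _
  unfold Spec_dfs
  rw [dfs_eq_pvT wires (pvZeros wires ch) ch rfl element, dfs_alt_eq_pvT]
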